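-- pv_equiv track=rewrite | github.com/qazmlpok/lot2util | lot2speed.py | db_to_game
-- ===== SOURCE A (Python) =====
-- def db_to_game(value):
--     if value <= 200:
--         return value
--     ret = 200
--     value -= 200
--     step = 2
--     while (value > 0):
--         if (value > 100):
--             ret += step * 100
--             value -= 100
--             step += 1
--         else:
--             ret += step * value
--             value = 0
--     return ret
-- ===== SOURCE B (Python) =====
-- def db_to_game(value):
--     # Closed form: each 100-point chunk past 200 costs step=2,3,... per point.
--     if value <= 200:
--         return value
--     q, r = divmod(value - 200, 100)
--     return 200 + 50 * q * (q + 3) + (q + 2) * r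
-- ===== Notes on version B (the rewrite author's own statement) =====
-- stated objective: faster
-- what changed: Replaces the chunk-by-chunk while loop with a closed-form arithmetic-series formula using divmod.
import Mathlib
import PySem

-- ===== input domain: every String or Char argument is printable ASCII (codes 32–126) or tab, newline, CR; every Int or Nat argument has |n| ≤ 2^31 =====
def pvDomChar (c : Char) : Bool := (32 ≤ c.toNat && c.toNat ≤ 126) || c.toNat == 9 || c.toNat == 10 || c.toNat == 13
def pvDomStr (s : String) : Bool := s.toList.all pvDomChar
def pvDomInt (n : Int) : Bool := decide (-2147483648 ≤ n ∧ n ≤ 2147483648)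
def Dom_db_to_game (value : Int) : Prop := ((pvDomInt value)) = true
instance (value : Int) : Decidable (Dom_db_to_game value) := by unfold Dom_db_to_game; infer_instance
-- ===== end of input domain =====

-- B replaces A's chunk-by-chunk while loop with a closed-form arithmetic-series formula (objective: faster).

-- ===== PORT A =====
-- the while loop of A, state (ret, value, step)
def db_loop (ret value step : Int) : Int :=
  if _h : value > 0 then
    if value > 100 then
      db_loop (ret + step * 100) (value - 100) (step + 1)
    else
      db_loop (ret + step * value) 0 step
  else ret
termination_by value.toNat
decreasing_by all_goals omega

def db_to_game (value : Int) : Int :=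
  if value ≤ 200 then value
  else db_loop 200 (value - 200) 2

-- ===== PORT B =====
def db_to_game_alt (value : Int) : Int :=
  if value ≤ 200 then value
  else
    let q := PySem.Int.floordiv (value - 200) 100
    let r := PySem.Int.mod (value - 200) 100
    200 + 50 * q * (q + 3) + (q + 2) * r

-- ===== PRECONDITION & SPEC =====
def Spec_db_to_game (value : Int) (out : Int) : Prop := out = db_to_game_alt value
instance (value : Int) (out : Int) : Decidable (Spec_db_to_game value out) := by unfold Spec_db_to_game; infer_instance

-- ===== CLAIM (what is proved, stated in full; the proofs are below) =====
def Claim_equal_db_to_game : Prop := ∀ (value : Int), Dom_db_to_game value → Spec_db_to_game value (db_to_game value)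

-- ===== LEMMAS AND PROOFS =====

-- the loop adds the chunked sum: with k = (v-1)/100 full chunks, the result is
-- ret + 100*(k*step + k*(k-1)/2-style series) + (step+k)*(v - 100*k)
theorem db_loop_eq (n : Nat) (v ret step : Int) (hv : 0 < v) (hn : v ≤ n) :
    db_loop ret v step =
      ret + 100 * ((v - 1) / 100) * step + 50 * ((v - 1) / 100) * ((v - 1) / 100 - 1)
        + (step + (v - 1) / 100) * (v - 100 * ((v - 1) / 100)) := by
  induction n generalizing v ret step with
  | zero => omega
  | succ m ih =>
    rw [db_loop]
    by_cases h100 : v > 100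
    · simp only [hv, h100, if_pos, dif_pos]
      rw [ih (v - 100) _ _ (by omega) (by omega)]
      have hk : (v - 100 - 1) / 100 = (v - 1) / 100 - 1 := by omega
      rw [hk]
      generalize (v - 1) / 100 = k
      ring
    · simp only [hv, h100, dif_pos, if_neg, not_false_iff]
      rw [db_loop]
      simp only [lt_irrefl, dite_false, gt_iff_lt]
      have hk : (v - 1) / 100 = 0 := by omega
      rw [hk]
      ring

theorem db_to_game_spec' (value : Int) : db_to_game value = db_to_game_alt value := by
  unfold db_to_game db_to_game_alt
  by_cases h : value ≤ 200
  · simp [h]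
  · simp only [h, if_neg, not_false_iff]
    have hv : 0 < value - 200 := by omega
    rw [db_loop_eq (value - 200).toNat (value - 200) 200 2 hv (by omega)]
    rw [PySem.Int.floordiv_eq_ediv_of_pos (by norm_num), PySem.Int.mod_eq_emod_of_pos (by norm_num)]
    set v := value - 200 with hvdef
    have hmod : v % 100 = v - 100 * (v / 100) := by omega
    rw [hmod]
    rcases eq_or_ne (v % 100) 0 with hr | hr
    · have hq : v = 100 * (v / 100) := by omega
      have hk : (v - 1) / 100 = v / 100 - 1 := by omega
      rw [hk]
      generalize hg : v / 100 = q at hq ⊢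
      rw [hq]
      ring
    · have hk : (v - 1) / 100 = v / 100 := by omega
      rw [hk]
      generalize v / 100 = q
      ring

-- ===== VERDICT (by name: the statement is the Claim_ definition above) =====
theorem db_to_game_spec : Claim_equal_db_to_game := by
  intro value _
  exact db_to_game_spec' value
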